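-- pv_equiv track=rewrite | github.com/pooya-mohammadi/cnn_receptive_field | receptive_field_size.py | get_receptive_field_size
-- ===== SOURCE A (Python) =====
-- from typing import Union
--
-- def get_receptive_field_size(kernel_sizes: Union[list, tuple], strides: Union[list, tuple]):
--     """
--     extract receptive field.
--     Note: the stride of the last layer is not taken into account becasue we only care about one point of it.
--     formula is taken from https://distill.pub/2019/computing-receptive-fields/#return-from-solving-receptive-field-size
--     :param kernel_sizes:
--     :param strides:
--     :return:
--     >>> get_receptive_field_size([1, 1, 1,1], [2, 2,2,2])
--     1
--     >>> get_receptive_field_size([5, 2], [3, 1])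
--     8
--     >>> get_receptive_field_size([2, 4, 3], [1, 2, 1])
--     9
--     >>> get_receptive_field_size([250, 48, 7, 7, 7, 7, 7, 7, 7, 32, 1, 1], [160, 2, 1, 1, 1, 1, 1, 1, 1, 1, 1, 1])
--     31130
--     """
--     assert len(kernel_sizes) == len(strides), "The lengths of the input parameters do no match!"
--     receptive_field = 0
--     length = len(kernel_sizes)
--     for l in range(length):
--         s = 1
--         for i in range(l):
--             s *= strides[i]
--         receptive_field += ((kernel_sizes[l] - 1) * s)
--     return receptive_field + 1
-- ===== SOURCE B (Python) =====
-- def get_receptive_field_size(kernel_sizes, strides):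
--     assert len(kernel_sizes) == len(strides), "The lengths of the input parameters do no match!"
--     receptive_field = 0
--     s = 1
--     for k, stride in zip(kernel_sizes, strides):
--         receptive_field += (k - 1) * s
--         s *= stride
--     return receptive_field + 1
-- ===== Notes on version B (the rewrite author's own statement) =====
-- stated objective: faster
-- what changed: Replaced the nested loop that recomputes the stride prefix-product from scratch for every layer by a single pass over zip(kernel_sizes, strides) that maintains a running cumulative stride product.
import Mathlib
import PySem

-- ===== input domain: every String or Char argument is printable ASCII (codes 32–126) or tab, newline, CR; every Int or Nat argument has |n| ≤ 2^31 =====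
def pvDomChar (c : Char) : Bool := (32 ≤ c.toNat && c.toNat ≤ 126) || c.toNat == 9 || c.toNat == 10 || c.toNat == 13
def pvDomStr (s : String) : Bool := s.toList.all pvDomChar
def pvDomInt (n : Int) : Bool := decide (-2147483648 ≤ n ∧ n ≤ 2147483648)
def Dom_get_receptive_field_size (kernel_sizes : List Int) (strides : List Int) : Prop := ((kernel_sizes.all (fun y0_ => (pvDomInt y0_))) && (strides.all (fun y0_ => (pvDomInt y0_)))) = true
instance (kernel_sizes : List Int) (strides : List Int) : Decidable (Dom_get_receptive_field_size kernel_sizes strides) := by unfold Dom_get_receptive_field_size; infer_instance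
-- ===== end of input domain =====

-- B replaces A's O(n^2) nested loops (the inner loop recomputes the stride prefix-product for
-- every layer) by one O(n) pass over zip(kernel_sizes, strides) carrying the running product.

-- ===== PORT A =====
-- inner loop "s = 1; for i in range(l): s *= strides[i]"
def pvInnerProd (strides : List Int) (l : Nat) : Int :=
  (List.range l).foldl (fun s i => s * strides.getD i 0) 1

-- outer loop "for l in range(length): receptive_field += (kernel_sizes[l]-1)*s"; "+ 1" at return
def get_receptive_field_size (kernel_sizes : List Int) (strides : List Int) : Int :=
  (List.range kernel_sizes.length).foldl
    (fun receptive_field l =>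
      receptive_field + (kernel_sizes.getD l 0 - 1) * pvInnerProd strides l) 0 + 1

-- ===== PORT B =====
-- single pass over zip with accumulator (receptive_field, running stride product s)
def get_receptive_field_size_alt (kernel_sizes : List Int) (strides : List Int) : Int :=
  ((kernel_sizes.zip strides).foldl
    (fun (acc : Int × Int) kst => (acc.1 + (kst.1 - 1) * acc.2, acc.2 * kst.2)) (0, 1)).1 + 1

-- ===== PRECONDITION & SPEC =====
-- Python A asserts the two lists have equal length (AssertionError otherwise)
def Pre_get_receptive_field_size (kernel_sizes : List Int) (strides : List Int) : Prop :=
  kernel_sizes.length = strides.length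
instance (kernel_sizes : List Int) (strides : List Int) : Decidable (Pre_get_receptive_field_size kernel_sizes strides) := by unfold Pre_get_receptive_field_size; infer_instance

def pvWitness_get_receptive_field_size : List Int × List Int := ([5, 2], [3, 1])

def Spec_get_receptive_field_size (kernel_sizes : List Int) (strides : List Int) (out : Int) : Prop := out = get_receptive_field_size_alt kernel_sizes strides
instance (kernel_sizes : List Int) (strides : List Int) (out : Int) : Decidable (Spec_get_receptive_field_size kernel_sizes strides out) := by unfold Spec_get_receptive_field_size; infer_instance

-- ===== CLAIM (what is proved, stated in full; the proofs are below) =====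
def Claim_equal_get_receptive_field_size : Prop := ∀ (kernel_sizes : List Int) (strides : List Int), Dom_get_receptive_field_size kernel_sizes strides → Pre_get_receptive_field_size kernel_sizes strides → Spec_get_receptive_field_size kernel_sizes strides (get_receptive_field_size kernel_sizes strides)

-- ===== LEMMAS AND PROOFS =====

-- reference recursion both ports are reduced to
def pvSpecRF : List Int → List Int → Int
  | k :: ks, st :: ss => (k - 1) + st * pvSpecRF ks ss
  | _, _ => 0

-- generic: pull the initial accumulator out of an add-shaped foldl
theorem pv_foldl_add_init (g : Int → Nat → Int) (h : ∀ a i, g a i = a + g 0 i)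
    (L : List Nat) : ∀ (a : Int), L.foldl g a = a + L.foldl g 0 := by
  induction L with
  | nil => intro a; simp
  | cons x xs ih =>
    intro a
    simp only [List.foldl_cons]
    rw [ih (g a x), ih (g 0 x), h a x]
    ring

-- generic: pull a constant factor out of a mul-shaped foldl
theorem pv_foldl_mul_init (f : Nat → Int) (L : List Nat) :
    ∀ (c : Int), L.foldl (fun s i => s * f i) c = c * L.foldl (fun s i => s * f i) 1 := by
  induction L with
  | nil => intro c; simp
  | cons x xs ih =>
    intro c
    simp only [List.foldl_cons]
    rw [ih (c * f x), ih (1 * f x)]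
    ring

theorem pv_inner_cons (st : Int) (ss : List Int) (i : Nat) :
    pvInnerProd (st :: ss) (i + 1) = st * pvInnerProd ss i := by
  unfold pvInnerProd
  rw [List.range_succ_eq_map, List.foldl_cons, List.foldl_map]
  simp only [List.getD_cons_succ, List.getD_cons_zero]
  rw [pv_foldl_mul_init (fun i => ss.getD i 0) (List.range i) (1 * st)]
  rw [pv_foldl_mul_init (fun i => ss.getD i 0) (List.range i) 1]
  ring

-- A's outer sum satisfies pvSpecRF's recursion
theorem pv_A_sum_eq_spec (ks : List Int) : ∀ (ss : List Int), ks.length = ss.length →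
    (List.range ks.length).foldl
      (fun rf l => rf + (ks.getD l 0 - 1) * pvInnerProd ss l) 0 = pvSpecRF ks ss := by
  induction ks with
  | nil => intro ss _; simp [pvSpecRF]
  | cons k ks ih =>
    intro ss hlen
    cases ss with
    | nil => simp at hlen
    | cons st ss =>
      simp only [List.length_cons, Nat.succ_inj] at hlen
      simp only [List.length_cons]
      rw [List.range_succ_eq_map, List.foldl_cons, List.foldl_map]
      simp only [List.getD_cons_succ, List.getD_cons_zero]
      have hstep : ∀ (a : Int) (i : Nat),
          a + (ks.getD i 0 - 1) * pvInnerProd (st :: ss) (i + 1)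
            = a + st * ((ks.getD i 0 - 1) * pvInnerProd ss i) := by
        intro a i; rw [pv_inner_cons]; ring
      have hfun : (fun (rf : Int) (i : Nat) =>
            rf + (ks.getD i 0 - 1) * pvInnerProd (st :: ss) (i + 1))
          = (fun (rf : Int) (i : Nat) => rf + st * ((ks.getD i 0 - 1) * pvInnerProd ss i)) := by
        funext a i; exact hstep a i
      rw [hfun]
      have hinit0 : pvInnerProd (st :: ss) 0 = 1 := by simp [pvInnerProd]
      rw [hinit0]
      rw [pv_foldl_add_init (fun rf i => rf + st * ((ks.getD i 0 - 1) * pvInnerProd ss i))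
          (by intro a i; ring) (List.range ks.length) (0 + (k - 1) * 1)]
      have hfactor : (List.range ks.length).foldl
            (fun rf i => rf + st * ((ks.getD i 0 - 1) * pvInnerProd ss i)) 0
          = st * (List.range ks.length).foldl
            (fun rf i => rf + (ks.getD i 0 - 1) * pvInnerProd ss i) 0 := by
        generalize List.range ks.length = L
        induction L with
        | nil => simp
        | cons x xs ihL =>
          simp only [List.foldl_cons]
          rw [pv_foldl_add_init (fun rf i => rf + st * ((ks.getD i 0 - 1) * pvInnerProd ss i))
              (by intro a i; ring) xs (0 + st * ((ks.getD x 0 - 1) * pvInnerProd ss x))]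
          rw [pv_foldl_add_init (fun rf i => rf + (ks.getD i 0 - 1) * pvInnerProd ss i)
              (by intro a i; ring) xs (0 + (ks.getD x 0 - 1) * pvInnerProd ss x)]
          rw [ihL]
          ring
      rw [hfactor, ih ss hlen]
      simp [pvSpecRF]

-- B's pair fold computes rf + s * pvSpecRF
theorem pv_B_fold_eq_spec (ks : List Int) : ∀ (ss : List Int) (rf s : Int),
    ((ks.zip ss).foldl
      (fun (acc : Int × Int) kst => (acc.1 + (kst.1 - 1) * acc.2, acc.2 * kst.2)) (rf, s)).1
    = rf + s * pvSpecRF ks ss := by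
  induction ks with
  | nil => intro ss rf s; simp [pvSpecRF]
  | cons k ks ih =>
    intro ss rf s
    cases ss with
    | nil => simp [pvSpecRF]
    | cons st ss =>
      simp only [List.zip_cons_cons, List.foldl_cons]
      rw [ih ss (rf + (k - 1) * s) (s * st)]
      simp [pvSpecRF]
      ring

-- ===== VERDICT (by name: the statement is the Claim_ definition above) =====
theorem get_receptive_field_size_spec : Claim_equal_get_receptive_field_size := by
  intro ks ss _ hpre
  unfold Spec_get_receptive_field_size get_receptive_field_size get_receptive_field_size_alt
  rw [pv_A_sum_eq_spec ks ss hpre, pv_B_fold_eq_spec ks ss 0 1]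
  ring
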